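-- pv_equiv track=rewrite | github.com/RainbowDragon/ACSL | Python/Contest 1/2020 - 2021/NumeralTrianglesJunior.py | sumOfLastRow
-- ===== SOURCE A (Python) =====
-- def sumOfLastRow(s, d, r):
--
--     result = 0
--     numbers_to_skip = r * (r - 1) // 2
--
--     current_number = transformToSingleDigit(s)
--     for k in range(numbers_to_skip):
--         current_number += d
--         current_number = transformToSingleDigit(current_number)
--
--     for k in range(r):
--         result += transformToSingleDigit(current_number)
--         current_number += d
--
--     return result
--
-- def transformToSingleDigit(number):
--
--     while number > 9:
--         digit_sum = 0
--
--         while number > 0: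
--             digit_sum += number % 10
--             number //= 10
--
--         number = digit_sum
--
--     return number
-- ===== SOURCE B (Python) =====
-- def sumOfLastRow(s, d, r):
--     # digital-root closed form replaces both quadratic-length transform loops
--     def dr(n):
--         return n if n <= 9 else 1 + (n - 1) % 9
--     skip = r * (r - 1) // 2
--     first = dr(dr(s) + skip * d)
--     return sum(dr(first + k * d) for k in range(r))
-- ===== Notes on version B (the rewrite author's own statement) =====
-- stated objective: faster
-- what changed: Replaces the O(r^2) skip loop of repeated digit-sum reductions with the digital-root closed form dr(n)=1+(n-1)%9 (identity for n<=9), computing the first element of the last row in O(1) and summing the row in one O(r) pass.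
import Mathlib
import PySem

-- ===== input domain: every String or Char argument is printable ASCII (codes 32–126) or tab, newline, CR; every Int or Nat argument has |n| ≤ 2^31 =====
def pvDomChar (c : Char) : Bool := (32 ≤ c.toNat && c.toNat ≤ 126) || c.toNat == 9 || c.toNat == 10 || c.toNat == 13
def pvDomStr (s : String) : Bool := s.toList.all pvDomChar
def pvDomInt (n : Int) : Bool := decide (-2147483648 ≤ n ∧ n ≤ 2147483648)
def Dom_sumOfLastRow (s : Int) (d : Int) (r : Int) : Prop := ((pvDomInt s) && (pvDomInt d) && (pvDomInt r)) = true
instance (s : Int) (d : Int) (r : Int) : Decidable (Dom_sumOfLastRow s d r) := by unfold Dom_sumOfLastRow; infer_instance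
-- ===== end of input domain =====

-- B replaces A's quadratic skip loop of repeated digit-sum reductions by the digital-root
-- closed form (objective: faster, asymptotic O(r) vs O(r^2) transform steps).

-- ===== PORT A =====
-- inner 'while number > 0' digit-sum loop of transformToSingleDigit
-- (fuel = number.toNat is a totality guard only: the loop runs at most that many times)
def pvDigitSumLoop : Nat → Int → Int → Int
  | 0, _, ds => ds
  | fuel + 1, number, ds =>
    if number > 0 then
      pvDigitSumLoop fuel (PySem.Int.floordiv number 10) (ds + PySem.Int.mod number 10)
    else ds

-- outer 'while number > 9' loop of transformToSingleDigit (same fuel discipline)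
def pvTransformGo : Nat → Int → Int
  | 0, number => number
  | fuel + 1, number =>
    if number > 9 then pvTransformGo fuel (pvDigitSumLoop number.toNat number 0) else number

def pvTransform (number : Int) : Int := pvTransformGo number.toNat number

def sumOfLastRow (s : Int) (d : Int) (r : Int) : Int :=
  let numbersToSkip := PySem.Int.floordiv (r * (r - 1)) 2
  let c0 := pvTransform s
  let c1 := (PySem.List.pyRange 0 numbersToSkip 1).foldl
              (fun c _ => pvTransform (c + d)) c0
  let p := (PySem.List.pyRange 0 r 1).foldl
              (fun (p : Int × Int) _ => (p.1 + pvTransform p.2, p.2 + d)) (0, c1)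
  p.1

-- ===== PORT B =====
-- dr(n) = n if n <= 9 else 1 + (n - 1) % 9
def pvDr (n : Int) : Int := if n ≤ 9 then n else 1 + PySem.Int.mod (n - 1) 9

def sumOfLastRow_alt (s : Int) (d : Int) (r : Int) : Int :=
  let skip := PySem.Int.floordiv (r * (r - 1)) 2
  let first := pvDr (pvDr s + skip * d)
  (PySem.List.pyRange 0 r 1).foldl (fun acc k => acc + pvDr (first + k * d)) 0

-- ===== PRECONDITION & SPEC =====
def Spec_sumOfLastRow (s : Int) (d : Int) (r : Int) (out : Int) : Prop := out = sumOfLastRow_alt s d r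
instance (s : Int) (d : Int) (r : Int) (out : Int) : Decidable (Spec_sumOfLastRow s d r out) := by unfold Spec_sumOfLastRow; infer_instance

-- ===== CLAIM (what is proved, stated in full; the proofs are below) =====
def Claim_equal_sumOfLastRow : Prop := ∀ (s : Int) (d : Int) (r : Int), Dom_sumOfLastRow s d r → Spec_sumOfLastRow s d r (sumOfLastRow s d r)

-- ===== LEMMAS AND PROOFS =====

theorem pvDr_le_nine (n : Int) : pvDr n ≤ 9 := by
  unfold pvDr
  rw [PySem.Int.mod_eq_emod_of_pos (by omega : (0:Int) < 9)]
  split_ifs <;> omega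

theorem pvDr_of_le (n : Int) (h : n ≤ 9) : pvDr n = n := by
  simp [pvDr, h]

-- invariants of the digit-sum loop (fuel-sufficiency, bounds, value mod 9)
theorem pvDigitSumLoop_spec (fuel : Nat) (number ds : Int) (h0 : 0 ≤ number)
    (hf : number.toNat ≤ fuel) :
    ds ≤ pvDigitSumLoop fuel number ds ∧
    pvDigitSumLoop fuel number ds ≤ ds + number ∧
    pvDigitSumLoop fuel number ds % 9 = (ds + number) % 9 ∧
    (0 < number → ds + 1 ≤ pvDigitSumLoop fuel number ds) ∧
    (9 < number → pvDigitSumLoop fuel number ds < ds + number) := by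
  induction fuel generalizing number ds with
  | zero =>
    simp only [pvDigitSumLoop]
    omega
  | succ f ih =>
    simp only [pvDigitSumLoop]
    rw [PySem.Int.floordiv_eq_ediv_of_pos (by omega),
        PySem.Int.mod_eq_emod_of_pos (by omega)]
    split_ifs with hpos
    · have hh := ih (number / 10) (ds + number % 10) (by omega) (by omega)
      omega
    · omega

-- transform equals the digital-root closed form everywhere
theorem pvTransformGo_eq_pvDr (fuel : Nat) (number : Int) (hf : number.toNat ≤ fuel) :
    pvTransformGo fuel number = pvDr number := by
  induction fuel generalizing number with
  | zero =>
    simp only [pvTransformGo]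
    exact (pvDr_of_le number (by omega)).symm
  | succ f ih =>
    simp only [pvTransformGo]
    split_ifs with h9
    · have hs := pvDigitSumLoop_spec number.toNat number 0 (by omega) le_rfl
      rw [ih (pvDigitSumLoop number.toNat number 0) (by omega)]
      unfold pvDr
      simp only [PySem.Int.mod_eq_emod_of_pos (by omega : (0:Int) < 9)]
      split_ifs <;> omega
    · exact (pvDr_of_le number (by omega)).symm

theorem pvTransform_eq_pvDr (n : Int) : pvTransform n = pvDr n :=
  pvTransformGo_eq_pvDr n.toNat n le_rfl

-- the key composition law behind collapsing the skip loop
theorem pvDr_pvDr (y e : Int) (h : 0 ≤ e ∨ y ≤ 9) : pvDr (pvDr y + e) = pvDr (y + e) := by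
  unfold pvDr
  simp only [PySem.Int.mod_eq_emod_of_pos (by omega : (0:Int) < 9)]
  split_ifs <;> omega

-- A's skip loop collapsed to a closed form (the list's elements are unused)
theorem skip_loop_eq {α : Type} (d : Int) (l : List α) (x : Int) (hx : x ≤ 9) :
    l.foldl (fun c _ => pvTransform (c + d)) x = pvDr (x + (l.length : Int) * d) := by
  induction l generalizing x with
  | nil => simp [pvDr_of_le x hx]
  | cons a l ih =>
    simp only [List.foldl_cons, List.length_cons]
    rw [pvTransform_eq_pvDr, ih (pvDr (x + d)) (pvDr_le_nine _)]
    rw [pvDr_pvDr (x + d) ((l.length : Int) * d) (by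
      rcases le_or_gt 0 d with hd | hd
      · exact Or.inl (by positivity)
      · exact Or.inr (by omega))]
    congr 1
    push_cast
    ring

-- common shape of the last-row sum
def pvRowSum (d : Int) : Nat → Int → Int
  | 0, _ => 0
  | n + 1, c => pvDr c + pvRowSum d n (c + d)

theorem rowSum_succ_right (d : Int) (n : Nat) (c : Int) :
    pvRowSum d (n + 1) c = pvRowSum d n c + pvDr (c + (n : Int) * d) := by
  induction n generalizing c with
  | zero => simp [pvRowSum]
  | succ n ih =>
    have step : ∀ (m : Nat) (c' : Int),
        pvRowSum d (m + 1) c' = pvDr c' + pvRowSum d m (c' + d) := fun m c' => rfl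
    rw [step (n + 1) c, ih (c + d), step n c]
    rw [show c + d + (n : Int) * d = c + ((n + 1 : Nat) : Int) * d by push_cast; ring]
    ring

-- A's second loop
theorem a_loop_eq {α : Type} (d : Int) (l : List α) (acc c : Int) :
    (l.foldl (fun (p : Int × Int) _ => (p.1 + pvTransform p.2, p.2 + d)) (acc, c)).1
      = acc + pvRowSum d l.length c := by
  induction l generalizing acc c with
  | nil => simp [pvRowSum]
  | cons a l ih =>
    simp only [List.foldl_cons, List.length_cons]
    rw [ih, pvTransform_eq_pvDr]
    show acc + pvDr c + pvRowSum d l.length (c + d) = acc + (pvDr c + pvRowSum d l.length (c + d))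
    ring

-- B's sum
theorem b_loop_eq (d : Int) (n : Nat) (c acc : Int) :
    (List.range n).foldl (fun (a : Int) (k : Nat) => a + pvDr (c + (k : Int) * d)) acc
      = acc + pvRowSum d n c := by
  induction n generalizing acc with
  | zero => simp [pvRowSum]
  | succ n ih =>
    rw [List.range_succ, List.foldl_append]
    simp only [List.foldl_cons, List.foldl_nil]
    rw [ih, rowSum_succ_right]
    ring

theorem skip_nonneg (r : Int) : 0 ≤ PySem.Int.floordiv (r * (r - 1)) 2 := by
  rw [PySem.Int.floordiv_eq_ediv_of_pos (by omega)]
  apply Int.ediv_nonneg _ (by omega)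
  rcases le_or_gt r 0 with h | h
  · nlinarith
  · nlinarith

-- ===== VERDICT (by name: the statement is the Claim_ definition above) =====
theorem sumOfLastRow_spec : Claim_equal_sumOfLastRow := by
  intro s d r _
  unfold Spec_sumOfLastRow
  simp only [sumOfLastRow, sumOfLastRow_alt]
  set m := PySem.Int.floordiv (r * (r - 1)) 2 with hm
  have hm0 : 0 ≤ m := skip_nonneg r
  rw [PySem.List.pyRange_one 0 m, PySem.List.pyRange_one 0 r]
  simp only [List.foldl_map, zero_add]
  rw [pvTransform_eq_pvDr s]
  rw [skip_loop_eq d _ (pvDr s) (pvDr_le_nine s)]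
  rw [a_loop_eq, b_loop_eq]
  simp only [List.length_range]
  rw [show (((m - 0).toNat : Nat) : Int) = m by omega]
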